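-- pv_equiv track=rewrite | github.com/the-lost-mahiro/My-LeetCode-Portfolio | contests/weekly-480/4064-minimum-deletions-to-make-alternating-substring/solution.py | minDeletions
-- ===== SOURCE A (Python) =====
-- from typing import List
--
-- class FenwickTree:
--     def __init__(self, n):
--         self.tree = [0] * (n + 1)
--
--     def update(self, i, delta):
--         i += 1
--         while i < len(self.tree):
--             self.tree[i] += delta
--             i += i & (-i)
--
--     def query(self, i):
--         i += 1
--         s = 0
--         while i > 0:
--             s += self.tree[i]
--             i -= i & (-i)
--         return s
--
--     def query_range(self, l, r):
--         if l > r: return 0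
--         return self.query(r) - self.query(l - 1)
--
-- def minDeletions(s: str, queries: List[List[int]]) -> List[int]:
--     s = list(s)
--     n = len(s)
--     bit = FenwickTree(n)
--
--     def is_bad(i):
--         if 0 <= i < n - 1:
--             return 1 if s[i] == s[i+1] else 0
--         return 0
--
--     bad_status = [0] * n
--     for i in range(n - 1):
--         if s[i] == s[i+1]:
--             bad_status[i] = 1
--             bit.update(i, 1)
--
--     ans = []
--
--     for query in queries:
--         if query[0] == 1:
--             idx = query[1]
--
--             if idx > 0:
--                 bit.update(idx - 1, -bad_status[idx - 1])
--
--             if idx < n - 1: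
--                 bit.update(idx, -bad_status[idx])
--
--             s[idx] = 'B' if s[idx] == 'A' else 'A'
--
--             if idx > 0:
--                 val = is_bad(idx - 1)
--                 bad_status[idx - 1] = val
--                 bit.update(idx - 1, val)
--
--             if idx < n - 1:
--                 val = is_bad(idx)
--                 bad_status[idx] = val
--                 bit.update(idx, val)
--         else:
--             l, r = query[1], query[2]
--             ans.append(bit.query_range(l, r - 1))
--
--     return ans
-- ===== SOURCE B (Python) =====
-- def _bisect_left(a, x):
--     lo, hi = 0, len(a)
--     while lo < hi:
--         mid = (lo + hi) // 2
--         if a[mid] < x: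
--             lo = mid + 1
--         else:
--             hi = mid
--     return lo
--
--
-- def _bisect_right(a, x):
--     lo, hi = 0, len(a)
--     while lo < hi:
--         mid = (lo + hi) // 2
--         if x < a[mid]:
--             hi = mid
--         else:
--             lo = mid + 1
--     return lo
--
--
-- def minDeletions(s, queries):
--     chars = list(s)
--     n = len(chars)
--     # sorted list of the positions p with chars[p] == chars[p+1]
--     bad = [p for p in range(n - 1) if chars[p] == chars[p + 1]]
--     ans = []
--     for q in queries:
--         if q[0] == 1:
--             idx = q[1]
--             chars[idx] = 'B' if chars[idx] == 'A' else 'A'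
--             for p in (idx - 1, idx):
--                 if 0 <= p < n - 1:
--                     j = _bisect_left(bad, p)
--                     present = j < len(bad) and bad[j] == p
--                     now = chars[p] == chars[p + 1]
--                     if now and not present:
--                         bad.insert(j, p)
--                     elif not now and present:
--                         bad.pop(j)
--         else:
--             l, r = q[1], q[2]
--             ans.append(_bisect_right(bad, r - 1) - _bisect_left(bad, l) if l <= r - 1 else 0)
--     return ans
-- ===== Notes on version B (the rewrite author's own statement) =====
-- stated objective: faster
-- what changed: Replaces the Fenwick tree plus bad_status prefix-sum accounting with a single sorted list of currently-bad pair positions: built once by a list comprehension, kept sorted by binary search on toggles (remove/re-add the two affected pair positions), with each range query answered as bisect_right(r-1) - bisect_left(l).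
import Mathlib
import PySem

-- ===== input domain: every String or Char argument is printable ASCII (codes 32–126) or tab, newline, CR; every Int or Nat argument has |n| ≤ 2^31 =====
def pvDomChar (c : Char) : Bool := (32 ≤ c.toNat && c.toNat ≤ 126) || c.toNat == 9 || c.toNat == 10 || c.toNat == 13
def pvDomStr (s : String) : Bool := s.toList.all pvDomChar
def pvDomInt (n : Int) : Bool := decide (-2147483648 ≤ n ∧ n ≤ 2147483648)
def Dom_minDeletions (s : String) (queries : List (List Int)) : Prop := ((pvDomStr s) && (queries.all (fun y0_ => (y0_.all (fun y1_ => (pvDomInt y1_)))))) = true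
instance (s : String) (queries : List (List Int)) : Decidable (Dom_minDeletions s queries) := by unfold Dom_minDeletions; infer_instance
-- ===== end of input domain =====

-- ===== PORT A =====
-- A re-implemented exactly: FenwickTree as a list; while-loops as fuelled recursion
-- (the fuel is only a totality device: within Pre_ it never runs out).
def pyLowbit (i : Int) : Int := Int.land i (-i)

def ftUpdateLoop (fuel : Nat) (tree : List Int) (i delta : Int) : List Int :=
  match fuel with
  | 0 => tree
  | f + 1 =>
    if i < (tree.length : Int) then
      ftUpdateLoop f (tree.modify i.toNat (· + delta)) (i + pyLowbit i) delta
    else tree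

-- update(i, delta): i += 1; while i < len(tree): tree[i] += delta; i += i & (-i)
def ftUpdate (tree : List Int) (i delta : Int) : List Int :=
  ftUpdateLoop tree.length tree (i + 1) delta

def ftQueryLoop (fuel : Nat) (tree : List Int) (i acc : Int) : Int :=
  match fuel with
  | 0 => acc
  | f + 1 =>
    if 0 < i then
      ftQueryLoop f tree (i - pyLowbit i) (acc + tree.getD i.toNat 0)
    else acc

-- query(i): i += 1; s = 0; while i > 0: s += tree[i]; i -= i & (-i)
def ftQuery (tree : List Int) (i : Int) : Int :=
  ftQueryLoop (i + 1).toNat tree (i + 1) 0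

def ftQueryRange (tree : List Int) (l r : Int) : Int :=
  if l > r then 0 else ftQuery tree r - ftQuery tree (l - 1)

def isBadA (cs : List Char) (i : Int) : Int :=
  if 0 ≤ i ∧ i < (cs.length : Int) - 1 then
    (if cs.getD i.toNat ' ' = cs.getD (i + 1).toNat ' ' then 1 else 0)
  else 0

-- for i in range(n-1): if s[i] == s[i+1]: bad_status[i] = 1; bit.update(i, 1)
def aInit (cs : List Char) : List Int × List Int :=
  (List.range (cs.length - 1)).foldl
    (fun (st : List Int × List Int) i =>
      if cs.getD i ' ' = cs.getD (i + 1) ' ' then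
        (st.1.set i 1, ftUpdate st.2 (i : Int) 1)
      else st)
    (List.replicate cs.length 0, List.replicate (cs.length + 1) 0)

def aStep (n : Int) (st : List Char × List Int × List Int × List Int) (q : List Int) :
    List Char × List Int × List Int × List Int :=
  let cs := st.1
  let bad := st.2.1
  let tree := st.2.2.1
  let ans := st.2.2.2
  if q.getD 0 0 = 1 then
    let idx := q.getD 1 0
    let tree1 := if idx > 0 then ftUpdate tree (idx - 1) (-(bad.getD (idx - 1).toNat 0)) else tree
    let tree2 := if idx < n - 1 then ftUpdate tree1 idx (-(bad.getD idx.toNat 0)) else tree1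
    let cs' := cs.set idx.toNat (if cs.getD idx.toNat ' ' = 'A' then 'B' else 'A')
    let v1 := isBadA cs' (idx - 1)
    let bad1 := if idx > 0 then bad.set (idx - 1).toNat v1 else bad
    let tree3 := if idx > 0 then ftUpdate tree2 (idx - 1) v1 else tree2
    let v2 := isBadA cs' idx
    let bad2 := if idx < n - 1 then bad1.set idx.toNat v2 else bad1
    let tree4 := if idx < n - 1 then ftUpdate tree3 idx v2 else tree3
    (cs', bad2, tree4, ans)
  else
    (cs, bad, tree, ans ++ [ftQueryRange tree (q.getD 1 0) (q.getD 2 0 - 1)])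

def minDeletions (s : String) (queries : List (List Int)) : List Int :=
  let cs := s.toList
  let st0 := aInit cs
  (queries.foldl (aStep (cs.length : Int)) (cs, st0.1, st0.2, [])).2.2.2

-- ===== PORT B =====
-- B (see Source B): sorted list of currently-bad pair positions, kept by binary search;
-- range queries answered by two bisections.  _bisect_left/_bisect_right are the
-- verbatim textbook loops = PySem.List.bisectLeft/bisectRight.
def bFix (cs : List Char) (bad : List Int) (p : Int) : List Int :=
  if 0 ≤ p ∧ p < (cs.length : Int) - 1 then
    let j := PySem.List.bisectLeft bad p
    let present := j < bad.length ∧ bad.getD j 0 = p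
    let now := cs.getD p.toNat ' ' = cs.getD (p + 1).toNat ' '
    if now ∧ ¬present then bad.insertIdx j p
    else if ¬now ∧ present then bad.eraseIdx j
    else bad
  else bad

def bStep (st : List Char × List Int × List Int) (q : List Int) :
    List Char × List Int × List Int :=
  let cs := st.1
  let bad := st.2.1
  let ans := st.2.2
  if q.getD 0 0 = 1 then
    let idx := q.getD 1 0
    let cs' := cs.set idx.toNat (if cs.getD idx.toNat ' ' = 'A' then 'B' else 'A')
    (cs', bFix cs' (bFix cs' bad (idx - 1)) idx, ans)
  else
    let l := q.getD 1 0
    let r := q.getD 2 0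
    let v := if l ≤ r - 1 then
        ((PySem.List.bisectRight bad (r - 1) : Int) - (PySem.List.bisectLeft bad l : Int))
      else 0
    (cs, bad, ans ++ [v])

def minDeletions_alt (s : String) (queries : List (List Int)) : List Int :=
  let cs := s.toList
  let bad := ((List.range (cs.length - 1)).filter
      (fun p => cs.getD p ' ' = cs.getD (p + 1) ' ')).map (fun p => (Int.ofNat p))
  (queries.foldl bStep (cs, bad, [])).2.2

-- ===== PRECONDITION & SPEC =====
-- Pre_ excludes exactly the inputs on which A does not return normally: a malformed
-- query (empty, or too short for its kind), a toggle index outside [0, n) (IndexError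
-- or a non-terminating Fenwick update), or a count query reaching past the tree
-- (IndexError when l ≤ r-1 and r > n).
def Pre_minDeletions (s : String) (queries : List (List Int)) : Prop :=
  ∀ q ∈ queries, q ≠ [] ∧
    (if q.getD 0 0 = 1 then
      2 ≤ q.length ∧ 0 ≤ q.getD 1 0 ∧ q.getD 1 0 < (s.toList.length : Int)
    else
      3 ≤ q.length ∧ (q.getD 1 0 ≤ q.getD 2 0 - 1 → q.getD 2 0 ≤ (s.toList.length : Int)))
instance (s : String) (queries : List (List Int)) : Decidable (Pre_minDeletions s queries) := by
  unfold Pre_minDeletions; infer_instance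

def pvWitness_minDeletions : String × List (List Int) :=
  ("AABAB", [[2, 0, 5], [1, 2], [2, 1, 4], [1, 4], [2, 0, 5]])

def Spec_minDeletions (s : String) (queries : List (List Int)) (out : List Int) : Prop := out = minDeletions_alt s queries
instance (s : String) (queries : List (List Int)) (out : List Int) : Decidable (Spec_minDeletions s queries out) := by unfold Spec_minDeletions; infer_instance

-- ===== CLAIM (what is proved, stated in full; the proofs are below) =====
def Claim_equal_minDeletions : Prop := ∀ (s : String) (queries : List (List Int)), Dom_minDeletions s queries → Pre_minDeletions s queries → Spec_minDeletions s queries (minDeletions s queries)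


-- ===== LEMMAS AND PROOFS =====

/-! Proof-side abstractions: `LB m = m & -m` on naturals, the pair predicate and
its 0/1 indicator `badVal`, the Fenwick-tree invariant `TreeInv`, and the sorted
bad-position list `badIdx` that B maintains. -/

def LB (m : Nat) : Nat := Nat.ldiff m (m - 1)

abbrev PairEq (cs : List Char) (p : Nat) : Prop :=
  p + 1 < cs.length ∧ cs.getD p ' ' = cs.getD (p + 1) ' '

def badVal (cs : List Char) (p : Nat) : Int := if PairEq cs p then 1 else 0

def TreeInv (n : Nat) (a : Nat → Int) (tree : List Int) : Prop :=
  tree.length = n + 1 ∧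
  ∀ j : Nat, 1 ≤ j → j ≤ n → tree.getD j 0 = ∑ x ∈ Finset.Ico (j - LB j) j, a x

abbrev coverN (p j : Nat) : Prop := p ≤ j ∧ j < LB j + p

def badIdx (cs : List Char) : List Int :=
  ((List.range (cs.length - 1)).filter
    (fun p => cs.getD p ' ' = cs.getD (p + 1) ' ')).map (fun p => (Int.ofNat p))

theorem LB_odd (m : Nat) (h : m % 2 = 1) : LB m = 1 := by
  unfold LB
  apply Nat.eq_of_testBit_eq
  intro i
  rw [Nat.testBit_ldiff]
  cases i with
  | zero =>
    simp [Nat.testBit_zero]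
    omega
  | succ i =>
    have h2 : m / 2 = (m - 1) / 2 := by omega
    rw [Nat.testBit_succ, Nat.testBit_succ, h2]
    simp [Nat.testBit_succ, Nat.zero_testBit]
theorem LB_even (m : Nat) (h0 : 0 < m) (h : m % 2 = 0) : LB m = 2 * LB (m / 2) := by
  unfold LB
  apply Nat.eq_of_testBit_eq
  intro i
  rw [Nat.testBit_ldiff]
  cases i with
  | zero =>
    have h1 : (m - 1) % 2 = 1 := by omega
    have h2 : (2 * Nat.ldiff (m / 2) (m / 2 - 1)) % 2 = 0 := by omega
    simp [Nat.testBit_zero]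
    omega
  | succ i =>
    have e1 : m / 2 - 1 = (m - 1) / 2 := by omega
    have e2 : (2 * Nat.ldiff (m / 2) (m / 2 - 1)) / 2 = Nat.ldiff (m / 2) (m / 2 - 1) := by omega
    rw [Nat.testBit_succ, Nat.testBit_succ, Nat.testBit_succ, e2, Nat.testBit_ldiff, e1]
theorem LB_spec (m : Nat) (h : 0 < m) : ∃ a t, m = 2 ^ a * (2 * t + 1) ∧ LB m = 2 ^ a := by
  induction m using Nat.strong_induction_on with
  | _ m ih =>
    rcases Nat.even_or_odd m with he | ho
    · have hme : m % 2 = 0 := Nat.even_iff.mp he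
      have h2 : 0 < m / 2 := by omega
      obtain ⟨a, t, hmt, hlb⟩ := ih (m / 2) (by omega) h2
      refine ⟨a + 1, t, ?_, ?_⟩
      · have : m = 2 * (m / 2) := by omega
        rw [this, hmt]; ring
      · rw [LB_even m h hme, hlb]; ring
    · refine ⟨0, (m - 1) / 2, ?_, ?_⟩
      · have := Nat.odd_iff.mp ho
        simp only [pow_zero, one_mul]
        omega
      · have := Nat.odd_iff.mp ho
        simpa using LB_odd m this
theorem LB_pos (m : Nat) (h : 0 < m) : 0 < LB m := by
  obtain ⟨a, t, _, hlb⟩ := LB_spec m h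
  rw [hlb]; positivity

theorem LB_dvd (m : Nat) (h : 0 < m) : LB m ∣ m := by
  obtain ⟨a, t, hm, hlb⟩ := LB_spec m h
  exact hlb ▸ hm ▸ Dvd.intro _ rfl

theorem LB_le (m : Nat) (h : 0 < m) : LB m ≤ m := Nat.le_of_dvd h (LB_dvd m h)

theorem pow_le_of_dvd_odd {k a t : Nat} (h : 2 ^ k ∣ 2 ^ a * (2 * t + 1)) : k ≤ a := by
  by_contra hk
  have h1 : (2:Nat) ^ (a + 1) ∣ 2 ^ k := pow_dvd_pow 2 (by omega)
  have h2 : (2:Nat) ^ (a + 1) ∣ 2 ^ a * (2 * t + 1) := h1.trans h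
  rw [pow_succ] at h2
  have h3 : (2:Nat) ∣ 2 * t + 1 := by
    rcases h2 with ⟨c, hc⟩
    have hp : (0:Nat) < 2 ^ a := by positivity
    have : 2 * t + 1 = 2 * c := by
      have := hc
      nlinarith [hp]
    omega
  omega
theorem dvd_LB_of_dvd {k m : Nat} (h0 : 0 < m) (h : 2 ^ k ∣ m) : 2 ^ k ∣ LB m := by
  obtain ⟨a, t, hm, hlb⟩ := LB_spec m h0
  rw [hm] at h
  exact hlb ▸ pow_dvd_pow 2 (pow_le_of_dvd_odd h)

theorem LB_add_of_small {m d : Nat} (h0 : 0 < m) (hd : 0 < d) (hlt : d < LB m) :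
    LB (m + d) ≤ d := by
  obtain ⟨a, t, hm, hlb⟩ := LB_spec m h0
  obtain ⟨c, u, hmd, hclb⟩ := LB_spec (m + d) (by omega)
  rw [hclb]
  by_contra hcon
  push Not at hcon
  have h2c : 2 ^ c ∣ m + d := ⟨2 * u + 1, hmd⟩
  have h2a : 2 ^ a ∣ m := ⟨2 * t + 1, hm⟩
  have hminc : 2 ^ min a c ∣ m := (pow_dvd_pow 2 (Nat.min_le_left a c)).trans h2a
  have hmind : 2 ^ min a c ∣ m + d := (pow_dvd_pow 2 (Nat.min_le_right a c)).trans h2c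
  have hdd : 2 ^ min a c ∣ d := by
    have := Nat.dvd_sub hmind hminc
    simpa using this
  have hge : 2 ^ min a c ≤ d := Nat.le_of_dvd hd hdd
  rcases Nat.le_total a c with hac | hac
  · rw [Nat.min_eq_left hac] at hge; rw [hlb] at hlt; omega
  · rw [Nat.min_eq_right hac] at hge; omega
theorem cover_next_not_self (p : Nat) (hp : 0 < p) : ¬ coverN (p + LB p) p := by
  intro ⟨h1, _⟩
  have := LB_pos p hp
  omega

theorem cover_step (p j : Nat) (hp : 0 < p) : coverN p j ↔ (j = p ∨ coverN (p + LB p) j) := by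
  obtain ⟨a, t, hm, hlb⟩ := LB_spec p hp
  have hP : (0:Nat) < 2 ^ a := by positivity
  have hq2 : 2 ^ (a + 1) ∣ p + LB p := ⟨t + 1, by rw [hlb, hm]; ring⟩
  have hqpos : 0 < p + LB p := by omega
  constructor
  · intro ⟨h1, h2⟩
    by_cases hj : j = p
    · exact Or.inl hj
    right
    have hpj : p < j := by omega
    by_cases hlt : j < p + LB p
    · exfalso
      have hd : 0 < j - p ∧ j - p < LB p := by omega
      have := LB_add_of_small hp hd.1 hd.2
      rw [Nat.add_sub_cancel' (by omega : p ≤ j)] at this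
      omega
    · refine ⟨by omega, ?_⟩
      have := LB_pos p hp
      omega
  · rintro (rfl | ⟨h1, h2⟩)
    · exact ⟨le_refl _, by have := LB_pos _ hp; omega⟩
    have hj1 : 0 < j := by omega
    refine ⟨by omega, ?_⟩
    by_cases hc : 2 ^ (a + 1) ∣ LB j
    · have hLBj_dvd_j : LB j ∣ j := LB_dvd j hj1
      have hdvd_j : 2 ^ (a + 1) ∣ j := hc.trans hLBj_dvd_j
      have hLBle : LB j ≤ j := LB_le j hj1
      have hsub : 2 ^ (a + 1) ∣ j - LB j := Nat.dvd_sub hdvd_j hc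
      by_contra hcon
      push Not at hcon
      have hx1 : p ≤ j - LB j ∧ j - LB j < p + 2 ^ a := by
        rw [hlb] at h1 h2; omega
      have hdiff : 2 ^ (a + 1) ∣ (p + 2 ^ a) - (j - LB j) := by
        have : (2:Nat) ^ (a + 1) ∣ p + 2 ^ a := by rw [← hlb]; exact hq2
        exact Nat.dvd_sub this hsub
      have hle := Nat.le_of_dvd (by omega) hdiff
      have h2a1 : (2:Nat) ^ (a + 1) = 2 * 2 ^ a := by ring
      omega
    · obtain ⟨c, u, hjm, hjlb⟩ := LB_spec j hj1
      have hca : c ≤ a := by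
        by_contra hgt
        exact hc (hjlb ▸ pow_dvd_pow 2 (by omega))
      have hdvd2a : LB j ∣ 2 ^ a := hjlb ▸ pow_dvd_pow 2 hca
      have hdvdq : LB j ∣ p + LB p :=
        hdvd2a.trans ((pow_dvd_pow 2 (Nat.le_succ a)).trans hq2)
      have hLBj_dvd_j : LB j ∣ j := LB_dvd j hj1
      have hsub : LB j ∣ j - (p + LB p) := Nat.dvd_sub hLBj_dvd_j hdvdq
      have hjq : j = p + LB p := by
        rcases Nat.eq_zero_or_pos (j - (p + LB p)) with hz | hpos
        · omega
        · have := Nat.le_of_dvd hpos hsub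
          omega
      exfalso
      exact hc (hjq ▸ dvd_LB_of_dvd hqpos hq2)
theorem lowbit_natCast (m : Nat) (h : 0 < m) : pyLowbit (m : Int) = (LB m : Int) := by
  obtain ⟨k, rfl⟩ := Nat.exists_eq_succ_of_ne_zero (Nat.pos_iff_ne_zero.mp h)
  show Int.land (Int.ofNat (k + 1)) (-(Int.ofNat (k + 1))) = _
  have hneg : -(Int.ofNat (k + 1)) = Int.negSucc k := rfl
  rw [hneg]
  show Int.ofNat ((k + 1).ldiff k) = _
  unfold LB
  norm_num

theorem getD_modify (l : List Int) (i j : Nat) (f : Int → Int) (hj : j < l.length) :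
    (l.modify i f).getD j 0 = if i = j then f (l.getD j 0) else l.getD j 0 := by
  simp [List.getD_eq_getElem?_getD, List.getElem?_modify, List.getElem?_eq_getElem hj]

theorem ftUpdateLoop_length (fuel : Nat) (tree : List Int) (i delta : Int) :
    (ftUpdateLoop fuel tree i delta).length = tree.length := by
  induction fuel generalizing tree i with
  | zero => rfl
  | succ f ih =>
    unfold ftUpdateLoop
    split
    · rw [ih, List.length_modify]
    · rfl

theorem ftUpdateLoop_getD (fuel : Nat) (p : Nat) (tree : List Int) (delta : Int) (j : Nat)
    (hp : 0 < p) (hfuel : tree.length ≤ p + fuel) (hj : j < tree.length) :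
    (ftUpdateLoop fuel tree (p : Int) delta).getD j 0 =
      tree.getD j 0 + (if coverN p j then delta else 0) := by
  induction fuel generalizing p tree with
  | zero =>
    have : ¬ coverN p j := by intro ⟨h1, _⟩; omega
    simp [ftUpdateLoop, this]
  | succ f ih =>
    unfold ftUpdateLoop
    by_cases hc : (p : Int) < (tree.length : Int)
    · rw [if_pos hc]
      have hplen : p < tree.length := by exact_mod_cast hc
      have hcast : (p : Int) + pyLowbit (p : Int) = ((p + LB p : Nat) : Int) := by
        rw [lowbit_natCast p hp]; push_cast; ring
      have hLBp := LB_pos p hp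
      have htn : (p : Int).toNat = p := Int.toNat_natCast p
      rw [htn, hcast]
      rw [ih (p + LB p) (tree.modify p (· + delta)) (by omega)
        (by rw [List.length_modify]; omega) (by rw [List.length_modify]; omega)]
      rw [getD_modify tree p j (· + delta) hj]
      have hiff := cover_step p j hp
      by_cases h1 : j = p
      · subst h1
        have hnc := cover_next_not_self j hp
        simp [hnc, hiff.mpr (Or.inl rfl)]
      · rw [if_neg (by omega : ¬ p = j)]
        by_cases h2 : coverN (p + LB p) j
        · rw [if_pos h2, if_pos (hiff.mpr (Or.inr h2))]
        · rw [if_neg h2, if_neg (by rw [hiff]; push Not; exact ⟨h1, h2⟩), add_zero]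
    · rw [if_neg hc]
      have : tree.length ≤ p := by exact_mod_cast not_lt.mp hc
      have : ¬ coverN p j := by intro ⟨hh, _⟩; omega
      simp [this]
theorem ftUpdate_TreeInv {n : Nat} {a : Nat → Int} {tree : List Int}
    (hInv : TreeInv n a tree) (pos : Int) (delta : Int) (h0 : 0 ≤ pos) (hn : pos < (n : Int)) :
    TreeInv n (fun x => if x = pos.toNat then a x + delta else a x) (ftUpdate tree pos delta) := by
  obtain ⟨hlen, hval⟩ := hInv
  have hposn : pos.toNat < n := by omega
  have hcast : pos + 1 = ((pos.toNat + 1 : Nat) : Int) := by omega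
  constructor
  · rw [ftUpdate, ftUpdateLoop_length, hlen]
  intro j hj1 hjn
  unfold ftUpdate
  rw [hcast, ftUpdateLoop_getD tree.length (pos.toNat + 1) tree delta j (by omega)
    (by omega) (by omega), hval j hj1 hjn]
  have hLBj := LB_le j (by omega)
  have hmem : coverN (pos.toNat + 1) j ↔ pos.toNat ∈ Finset.Ico (j - LB j) j := by
    rw [Finset.mem_Ico]; unfold coverN; omega
  have hsplit : ∑ x ∈ Finset.Ico (j - LB j) j, (if x = pos.toNat then a x + delta else a x)
      = (∑ x ∈ Finset.Ico (j - LB j) j, a x)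
        + (if pos.toNat ∈ Finset.Ico (j - LB j) j then delta else 0) := by
    rw [← Finset.sum_ite_eq' (Finset.Ico (j - LB j) j) pos.toNat (fun _ => delta),
      ← Finset.sum_add_distrib]
    apply Finset.sum_congr rfl
    intro x _
    by_cases hx : x = pos.toNat <;> simp [hx]
  rw [hsplit]
  by_cases hcov : coverN (pos.toNat + 1) j
  · rw [if_pos hcov, if_pos (hmem.mp hcov)]
  · rw [if_neg hcov, if_neg (fun hm => hcov (hmem.mpr hm))]

theorem ftQueryLoop_eq {n : Nat} {a : Nat → Int} {tree : List Int} (hInv : TreeInv n a tree) :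
    ∀ (fuel : Nat) (i : Nat) (acc : Int), i ≤ fuel → i ≤ n →
      ftQueryLoop fuel tree (i : Int) acc = acc + ∑ x ∈ Finset.range i, a x := by
  intro fuel
  induction fuel with
  | zero =>
    intro i acc hif hin
    have : i = 0 := by omega
    subst this
    simp [ftQueryLoop]
  | succ f ih =>
    intro i acc hif hin
    match i with
    | 0 => simp [ftQueryLoop]
    | k + 1 =>
      have hpos : (0 : Int) < ((k + 1 : Nat) : Int) := by positivity
      have hLB := LB_pos (k + 1) (by omega)
      have hLBle := LB_le (k + 1) (by omega)
      unfold ftQueryLoop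
      rw [if_pos hpos]
      have h1 : ((k + 1 : Nat) : Int) - pyLowbit ((k + 1 : Nat) : Int)
          = ((k + 1 - LB (k + 1) : Nat) : Int) := by
        rw [lowbit_natCast (k + 1) (by omega)]; push_cast [hLBle]; ring
      have h2 : ((k + 1 : Nat) : Int).toNat = k + 1 := Int.toNat_natCast _
      rw [h1, h2, hInv.2 (k + 1) (by omega) hin,
        ih (k + 1 - LB (k + 1)) _ (by omega) (by omega)]
      have hsum := Finset.sum_Ico_consecutive a (by omega : 0 ≤ k + 1 - LB (k + 1))
        (by omega : k + 1 - LB (k + 1) ≤ k + 1)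
      simp only [Finset.range_eq_Ico]
      rw [← hsum]
      ring

theorem ftQuery_eq {n : Nat} {a : Nat → Int} {tree : List Int} (hInv : TreeInv n a tree)
    (r : Int) (hr : r ≤ (n : Int)) :
    ftQuery tree (r - 1) = ∑ x ∈ Finset.range r.toNat, a x := by
  unfold ftQuery
  have h1 : r - 1 + 1 = r := by ring
  rw [h1]
  rcases le_or_gt r 0 with hr0 | hr0
  · have : r.toNat = 0 := by omega
    rw [this]
    simp [ftQueryLoop]
  · have : r = ((r.toNat : Nat) : Int) := by omega
    rw [this, Int.toNat_natCast]
    rw [ftQueryLoop_eq hInv r.toNat r.toNat 0 (le_refl _) (by omega), zero_add]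

theorem ftQueryRange_eq {n : Nat} {a : Nat → Int} {tree : List Int} (hInv : TreeInv n a tree)
    (l r : Int) (hlr : l ≤ r - 1) (hr : r ≤ (n : Int)) :
    ftQueryRange tree l (r - 1) = ∑ x ∈ Finset.Ico l.toNat r.toNat, a x := by
  unfold ftQueryRange
  rw [if_neg (by omega)]
  rw [ftQuery_eq hInv r hr, ftQuery_eq hInv l (by omega)]
  rw [Finset.sum_Ico_eq_sub a (by omega : l.toNat ≤ r.toNat)]
theorem mem_badIdx (cs : List Char) (x : Int) :
    x ∈ badIdx cs ↔ 0 ≤ x ∧ PairEq cs x.toNat := by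
  unfold badIdx
  simp only [List.mem_map, List.mem_filter, List.mem_range, decide_eq_true_eq]
  simp only [Int.ofNat_eq_natCast]
  constructor
  · rintro ⟨p, ⟨hp, heq⟩, rfl⟩
    refine ⟨by positivity, ?_⟩
    rw [Int.toNat_natCast]
    exact ⟨by omega, heq⟩
  · rintro ⟨hx, h1, h2⟩
    exact ⟨x.toNat, ⟨by omega, h2⟩, by omega⟩

theorem badIdx_sorted (cs : List Char) : List.Pairwise (· < ·) (badIdx cs) := by
  unfold badIdx
  rw [List.pairwise_map]
  exact (List.pairwise_lt_range.filter _).imp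
    (by intro a b h; simp only [Int.ofNat_eq_natCast]; exact_mod_cast h)

theorem sorted_unique (u v : List Int) (hu : List.Pairwise (· < ·) u)
    (hv : List.Pairwise (· < ·) v) (h : ∀ x, x ∈ u ↔ x ∈ v) : u = v := by
  apply List.Perm.eq_of_pairwise (le := (· < ·))
    (fun a b _ _ h1 h2 => absurd (lt_trans h1 h2) (lt_irrefl a)) hu hv
  rw [List.perm_ext_iff_of_nodup (hu.imp ne_of_lt) (hv.imp ne_of_lt)]
  exact h

theorem countP_of_split (P : Int → Bool) :
    ∀ (ys : List Int) (j : Nat), j ≤ ys.length →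
      (∀ i (h : i < ys.length), i < j → P ys[i]) →
      (∀ i (h : i < ys.length), j ≤ i → ¬ P ys[i]) →
      ys.countP P = j := by
  intro ys
  induction ys with
  | nil =>
    intro j hj _ _
    simp only [List.countP_nil]
    simp at hj
    omega
  | cons y t ih =>
    intro j hj hpre hsuf
    rw [List.countP_cons]
    match j with
    | 0 =>
      have h0 : ¬ P y := by have := hsuf 0 (by simp) (by omega); simpa using this
      rw [if_neg h0, add_zero]
      exact ih 0 (by omega) (by omega)
        (fun i h _ => by have := hsuf (i + 1) (by simpa using h) (by omega); simpa using this)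
    | k + 1 =>
      have h0 : P y := by have := hpre 0 (by simp) (by omega); simpa using this
      rw [if_pos h0]
      have : t.countP P = k := ih k (by simpa using hj)
        (fun i h hik => by have := hpre (i + 1) (by simpa using h) (by omega); simpa using this)
        (fun i h hik => by have := hsuf (i + 1) (by simpa using h) (by omega); simpa using this)
      omega

theorem bisectLeft_countP (bad : List Int) (x : Int) (hs : List.Pairwise (· < ·) bad) :
    PySem.List.bisectLeft bad x = bad.countP (fun y => decide (y < x)) := by
  obtain ⟨hle, hpre, hsuf⟩ := PySem.List.bisectLeft_spec bad x (hs.imp le_of_lt)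
  exact (countP_of_split _ bad _ hle
    (fun i h hi => by simpa using hpre i h hi)
    (fun i h hi => by simpa using not_lt.mpr (hsuf i h hi))).symm

theorem bisectRight_countP (bad : List Int) (x : Int) (hs : List.Pairwise (· < ·) bad) :
    PySem.List.bisectRight bad x = bad.countP (fun y => decide (y ≤ x)) := by
  obtain ⟨hle, hpre, hsuf⟩ := PySem.List.bisectRight_spec bad x (hs.imp le_of_lt)
  exact (countP_of_split _ bad _ hle
    (fun i h hi => by simpa using hpre i h hi)
    (fun i h hi => by simpa using not_le.mpr (hsuf i h hi))).symm

theorem bisectLeft_present (bad : List Int) (x : Int) (hs : List.Pairwise (· < ·) bad) :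
    (PySem.List.bisectLeft bad x < bad.length ∧ bad.getD (PySem.List.bisectLeft bad x) 0 = x)
      ↔ x ∈ bad := by
  obtain ⟨hle, hpre, hsuf⟩ := PySem.List.bisectLeft_spec bad x (hs.imp le_of_lt)
  set j := PySem.List.bisectLeft bad x with hj
  constructor
  · rintro ⟨h1, h2⟩
    rw [List.getD_eq_getElem?_getD, List.getElem?_eq_getElem h1] at h2
    exact h2 ▸ List.getElem_mem h1
  · intro hx
    obtain ⟨k, hk, hkx⟩ := List.mem_iff_getElem.mp hx
    have hjk : j ≤ k := by
      by_contra hlt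
      exact absurd (hkx ▸ hpre k hk (by omega)) (lt_irrefl x)
    have h1 : j < bad.length := by omega
    have hmono := List.pairwise_iff_getElem.mp hs
    have hbound : bad[j] ≤ bad[k] := by
      rcases Nat.eq_or_lt_of_le hjk with rfl | hlt
      · exact le_refl _
      · exact le_of_lt (hmono j k h1 hk hlt)
    have hge := hsuf j h1 (le_refl _)
    refine ⟨h1, ?_⟩
    rw [List.getD_eq_getElem?_getD, List.getElem?_eq_getElem h1]
    simp only [Option.getD_some]
    omega
theorem insertIdx_eq_take_cons_drop (l : List Int) (j : Nat) (x : Int) (h : j ≤ l.length) :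
    l.insertIdx j x = l.take j ++ x :: l.drop j := by
  induction l generalizing j with
  | nil =>
    simp at h
    subst h
    rfl
  | cons y t ih =>
    match j with
    | 0 => rfl
    | k + 1 =>
      simp only [List.insertIdx_succ_cons, List.take_succ_cons, List.drop_succ_cons,
        List.cons_append]
      rw [ih k (by simpa using h)]
theorem bFix_out (cs : List Char) (bad : List Int) (p : Int)
    (hp : ¬ (0 ≤ p ∧ p < (cs.length : Int) - 1)) : bFix cs bad p = bad := by
  unfold bFix
  rw [if_neg hp]

/-- Inside the valid range, `bFix` keeps the list sorted and sets membership of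
`p` according to the current pair, leaving all other members unchanged. -/
theorem bFix_char (cs : List Char) (bad : List Int) (p : Int)
    (hs : List.Pairwise (· < ·) bad) (hp : 0 ≤ p ∧ p < (cs.length : Int) - 1) :
    List.Pairwise (· < ·) (bFix cs bad p) ∧
    (∀ x : Int, x ∈ bFix cs bad p ↔ ((x = p ∧ PairEq cs p.toNat) ∨ (x ≠ p ∧ x ∈ bad))) := by
  obtain ⟨hle, hpre, hsuf⟩ := PySem.List.bisectLeft_spec bad p (hs.imp le_of_lt)
  have hpres := bisectLeft_present bad p hs
  have hmono := List.pairwise_iff_getElem.mp hs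
  have hnowPair : (cs.getD p.toNat ' ' = cs.getD (p + 1).toNat ' ') ↔ PairEq cs p.toNat := by
    unfold PairEq
    have h1 : (p + 1).toNat = p.toNat + 1 := by omega
    rw [h1]
    constructor
    · exact fun h => ⟨by omega, h⟩
    · exact fun h => h.2
  unfold bFix
  rw [if_pos hp]
  set j := PySem.List.bisectLeft bad p with hj
  by_cases hnow : cs.getD p.toNat ' ' = cs.getD (p + 1).toNat ' '
  · by_cases hpresent : j < bad.length ∧ bad.getD j 0 = p
    · -- present and still bad: unchanged
      rw [if_neg (by tauto), if_neg (by tauto)]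
      refine ⟨hs, fun x => ?_⟩
      have hmem : p ∈ bad := hpres.mp hpresent
      constructor
      · intro hx
        by_cases hxp : x = p
        · exact Or.inl ⟨hxp, hnowPair.mp hnow⟩
        · exact Or.inr ⟨hxp, hx⟩
      · rintro (⟨rfl, _⟩ | ⟨_, hx⟩) <;> [exact hmem; exact hx]
    · -- absent and bad: insert
      rw [if_pos ⟨hnow, hpresent⟩]
      rw [insertIdx_eq_take_cons_drop bad j p hle]
      have hdrop_gt : ∀ y ∈ bad.drop j, p < y := by
        intro y hy
        obtain ⟨i, hm, hig⟩ := List.mem_drop_iff_getElem.mp hy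
        have hgej := hsuf (j + i) (by omega) (by omega)
        rcases Nat.eq_zero_or_pos i with rfl | hipos
        · -- y = bad[j]; p ≤ y and y ≠ p since not present
          have hne : bad.getD (j + 0) 0 ≠ p := by
            intro hc
            exact hpresent ⟨by omega, by simpa using hc⟩
          rw [List.getD_eq_getElem?_getD, List.getElem?_eq_getElem (by omega)] at hne
          simp only [Option.getD_some] at hne
          rw [← hig]
          have := hsuf (j + 0) (by omega) (by omega)
          omega
        · have hlt := hmono j (j + i) (by omega) (by omega) (by omega)
          have := hsuf j (by omega) (le_refl _)
          omega
      have htake_lt : ∀ y ∈ bad.take j, y < p := by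
        intro y hy
        obtain ⟨i, hm, hig⟩ := List.mem_take_iff_getElem.mp hy
        exact hig ▸ hpre i (by omega) (by omega)
      constructor
      · rw [List.pairwise_append]
        refine ⟨hs.sublist (List.take_sublist _ _), ?_, ?_⟩
        · rw [List.pairwise_cons]
          exact ⟨hdrop_gt, hs.sublist (List.drop_sublist _ _)⟩
        · intro a ha b hb
          have h1 := htake_lt a ha
          rcases List.mem_cons.mp hb with rfl | hb'
          · exact h1
          · exact lt_trans h1 (hdrop_gt b hb')
      · intro x
        rw [List.mem_append, List.mem_cons]
        constructor
        · rintro (hx | rfl | hx)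
          · exact Or.inr ⟨ne_of_lt (htake_lt x hx), (List.take_sublist _ _).mem hx⟩
          · exact Or.inl ⟨rfl, hnowPair.mp hnow⟩
          · exact Or.inr ⟨(ne_of_lt (hdrop_gt x hx)).symm, (List.drop_sublist _ _).mem hx⟩
        · rintro (⟨rfl, _⟩ | ⟨hne, hx⟩)
          · exact Or.inr (Or.inl rfl)
          · obtain ⟨k, hk, hkx⟩ := List.mem_iff_getElem.mp hx
            rcases Nat.lt_or_ge k j with hkj | hkj
            · exact Or.inl (List.mem_take_iff_getElem.mpr ⟨k, by omega, hkx⟩)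
            · right; right
              refine List.mem_drop_iff_getElem.mpr ⟨k - j, by omega, ?_⟩
              rw [← hkx]
              congr 1
              omega
  · have hnoPair : ¬ PairEq cs p.toNat := fun h => hnow (hnowPair.mpr h)
    by_cases hpresent : j < bad.length ∧ bad.getD j 0 = p
    · -- present but no longer bad: pop
      rw [if_neg (by tauto), if_pos (by tauto)]
      have hgetj : bad[j]'(hpresent.1) = p := by
        have := hpresent.2
        rwa [List.getD_eq_getElem?_getD, List.getElem?_eq_getElem hpresent.1,
          Option.getD_some] at this
      refine ⟨hs.sublist (List.eraseIdx_sublist bad j), fun x => ?_⟩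
      rw [List.eraseIdx_eq_take_drop_succ, List.mem_append]
      constructor
      · rintro (hx | hx)
        · obtain ⟨i, hm, hig⟩ := List.mem_take_iff_getElem.mp hx
          have := hpre i (by omega) (by omega)
          exact Or.inr ⟨by omega, hig ▸ List.getElem_mem _⟩
        · obtain ⟨i, hm, hig⟩ := List.mem_drop_iff_getElem.mp hx
          have := hmono j (j + 1 + i) hpresent.1 (by omega) (by omega)
          rw [hgetj] at this
          exact Or.inr ⟨by omega, hig ▸ List.getElem_mem _⟩
      · rintro (⟨rfl, hpe⟩ | ⟨hne, hx⟩)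
        · exact absurd hpe hnoPair
        · obtain ⟨k, hk, hkx⟩ := List.mem_iff_getElem.mp hx
          have hkj : k ≠ j := by rintro rfl; exact hne (by rw [← hkx, hgetj])
          rcases Nat.lt_or_ge k j with hlt | hge
          · exact Or.inl (List.mem_take_iff_getElem.mpr ⟨k, by omega, hkx⟩)
          · refine Or.inr (List.mem_drop_iff_getElem.mpr ⟨k - j - 1, by omega, ?_⟩)
            rw [← hkx]
            congr 1
            omega
    · -- absent and not bad: unchanged
      rw [if_neg (by tauto), if_neg (by tauto)]
      refine ⟨hs, fun x => ?_⟩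
      have hpnot : p ∉ bad := fun hm => hpresent (hpres.mpr hm)
      constructor
      · intro hx
        exact Or.inr ⟨by rintro rfl; exact hpnot hx, hx⟩
      · rintro (⟨rfl, hpe⟩ | ⟨_, hx⟩)
        · exact absurd hpe hnoPair
        · exact hx
theorem getD_set_ne (cs : List Char) (k : Nat) (c : Char) (i : Nat) (h : k ≠ i) :
    (cs.set k c).getD i ' ' = cs.getD i ' ' := by
  simp [List.getD_eq_getElem?_getD, h]

theorem PairEq_set_ne (cs : List Char) (k : Nat) (c : Char) (x : Nat)
    (h1 : x ≠ k) (h2 : x + 1 ≠ k) : PairEq (cs.set k c) x ↔ PairEq cs x := by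
  unfold PairEq
  rw [List.length_set, getD_set_ne cs k c x (by omega), getD_set_ne cs k c (x + 1) (by omega)]

theorem badVal_set_ne (cs : List Char) (k : Nat) (c : Char) (x : Nat)
    (h1 : x ≠ k) (h2 : x + 1 ≠ k) : badVal (cs.set k c) x = badVal cs x := by
  unfold badVal
  by_cases h : PairEq cs x
  · rw [if_pos h, if_pos ((PairEq_set_ne cs k c x h1 h2).mpr h)]
  · rw [if_neg h, if_neg (fun hc => h ((PairEq_set_ne cs k c x h1 h2).mp hc))]

theorem isBadA_eq_badVal (cs : List Char) (i : Int) (h : 0 ≤ i) :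
    isBadA cs i = badVal cs i.toNat := by
  unfold isBadA badVal PairEq
  have h1 : (i + 1).toNat = i.toNat + 1 := by omega
  by_cases hlt : i < (cs.length : Int) - 1
  · rw [if_pos ⟨h, hlt⟩, h1]
    by_cases he : cs.getD i.toNat ' ' = cs.getD (i.toNat + 1) ' '
    · rw [if_pos he, if_pos ⟨by omega, he⟩]
    · rw [if_neg he, if_neg (fun hc => he hc.2)]
  · rw [if_neg (fun hc => hlt hc.2), if_neg (fun hc => hlt (by omega))]

theorem mem_bFix' (cs : List Char) (l : List Int) (p : Int)
    (hs : List.Pairwise (· < ·) l)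
    (hsub : ∀ y ∈ l, 0 ≤ y ∧ y < (cs.length : Int) - 1) (x : Int) :
    x ∈ bFix cs l p ↔
      ((x = p ∧ 0 ≤ p ∧ p < (cs.length : Int) - 1 ∧ PairEq cs p.toNat) ∨ (x ≠ p ∧ x ∈ l)) := by
  by_cases hp : 0 ≤ p ∧ p < (cs.length : Int) - 1
  · rw [(bFix_char cs l p hs hp).2 x]
    constructor
    · rintro (⟨rfl, hpe⟩ | hx)
      · exact Or.inl ⟨rfl, hp.1, hp.2, hpe⟩
      · exact Or.inr hx
    · rintro (⟨rfl, _, _, hpe⟩ | hx)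
      · exact Or.inl ⟨rfl, hpe⟩
      · exact Or.inr hx
  · rw [bFix_out cs l p hp]
    constructor
    · intro hx
      refine Or.inr ⟨?_, hx⟩
      rintro rfl
      exact hp ⟨(hsub x hx).1, (hsub x hx).2⟩
    · rintro (⟨rfl, h1, h2, _⟩ | hx)
      · exact absurd ⟨h1, h2⟩ hp
      · exact hx.2

theorem bFix_sorted' (cs : List Char) (l : List Int) (p : Int)
    (hs : List.Pairwise (· < ·) l) : List.Pairwise (· < ·) (bFix cs l p) := by
  by_cases hp : 0 ≤ p ∧ p < (cs.length : Int) - 1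
  · exact (bFix_char cs l p hs hp).1
  · rw [bFix_out cs l p hp]; exact hs

theorem bFix_sub (cs : List Char) (l : List Int) (p : Int)
    (hs : List.Pairwise (· < ·) l)
    (hsub : ∀ y ∈ l, 0 ≤ y ∧ y < (cs.length : Int) - 1) :
    ∀ y ∈ bFix cs l p, 0 ≤ y ∧ y < (cs.length : Int) - 1 := by
  intro y hy
  rcases (mem_bFix' cs l p hs hsub y).mp hy with ⟨rfl, h1, h2, _⟩ | ⟨_, hx⟩
  · exact ⟨h1, h2⟩
  · exact hsub y hx

theorem badIdx_sub (cs : List Char) :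
    ∀ y ∈ badIdx cs, 0 ≤ y ∧ y < (cs.length : Int) - 1 := by
  intro y hy
  obtain ⟨h0, h1, _⟩ := (mem_badIdx cs y).mp hy
  exact ⟨h0, by omega⟩

theorem bFix_toggle (cs cs' : List Char) (idx : Int) (h0 : 0 ≤ idx)
    (hn : idx < (cs.length : Int))
    (hcs' : cs' = cs.set idx.toNat (if cs.getD idx.toNat ' ' = 'A' then 'B' else 'A')) :
    bFix cs' (bFix cs' (badIdx cs) (idx - 1)) idx = badIdx cs' := by
  have hlen : cs'.length = cs.length := by rw [hcs', List.length_set]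
  have hsub0 : ∀ y ∈ badIdx cs, 0 ≤ y ∧ y < (cs'.length : Int) - 1 := by
    rw [hlen]; exact badIdx_sub cs
  have hs0 := badIdx_sorted cs
  have hs1 := bFix_sorted' cs' (badIdx cs) (idx - 1) hs0
  have hsub1 := bFix_sub cs' (badIdx cs) (idx - 1) hs0 hsub0
  apply sorted_unique _ _ (bFix_sorted' cs' _ idx hs1) (badIdx_sorted cs')
  intro x
  rw [mem_bFix' cs' _ idx hs1 hsub1 x, mem_bFix' cs' _ (idx - 1) hs0 hsub0 x,
    mem_badIdx cs x, mem_badIdx cs' x]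
  have htransfer : ∀ z : Int, 0 ≤ z → z ≠ idx → z ≠ idx - 1 →
      (PairEq cs' z.toNat ↔ PairEq cs z.toNat) := by
    intro z hz hz1 hz2
    rw [hcs']
    exact PairEq_set_ne cs idx.toNat _ z.toNat (by omega) (by omega)
  by_cases hx0 : 0 ≤ x
  · by_cases hxi : x = idx
    · have hxt : x.toNat = idx.toNat := by rw [hxi]
      constructor
      · rintro (⟨_, _, _, hpe⟩ | ⟨hne, _⟩)
        · exact ⟨hx0, by rw [hxt]; exact hpe⟩
        · exact absurd hxi hne
      · rintro ⟨_, hpe⟩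
        have hlt : idx < (cs'.length : Int) - 1 := by
          have h2 := hpe.1; omega
        exact Or.inl ⟨hxi, h0, hlt, by rw [← hxt]; exact hpe⟩
    · by_cases hxi1 : x = idx - 1
      · have hxt : x.toNat = (idx - 1).toNat := by rw [hxi1]
        constructor
        · rintro (⟨h, _⟩ | ⟨_, ⟨_, _, _, hpe⟩ | ⟨hne, _⟩⟩)
          · exact absurd h hxi
          · exact ⟨hx0, by rw [hxt]; exact hpe⟩
          · exact absurd hxi1 hne
        · rintro ⟨_, hpe⟩
          have h01 : (0:Int) ≤ idx - 1 := by omega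
          have hlt : idx - 1 < (cs'.length : Int) - 1 := by
            have h2 := hpe.1; omega
          exact Or.inr ⟨hxi, Or.inl ⟨hxi1, h01, hlt, by rw [← hxt]; exact hpe⟩⟩
      · have ht := htransfer x hx0 hxi hxi1
        constructor
        · rintro (⟨h, _⟩ | ⟨_, ⟨h, _⟩ | ⟨_, _, hpe⟩⟩)
          · exact absurd h hxi
          · exact absurd h hxi1
          · exact ⟨hx0, ht.mpr hpe⟩
        · rintro ⟨_, hpe⟩
          exact Or.inr ⟨hxi, Or.inr ⟨hxi1, hx0, ht.mp hpe⟩⟩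
  · constructor
    · rintro (⟨rfl, h, _⟩ | ⟨_, ⟨rfl, h, _⟩ | ⟨_, _, hpe⟩⟩)
      · exact absurd h hx0
      · exact absurd h hx0
      · exact absurd ‹(0:Int) ≤ x› hx0
    · rintro ⟨h, _⟩
      exact absurd h hx0
theorem countP_lt_sum (cs : List Char) (b : Int) :
    ∀ m : Nat, m ≤ cs.length - 1 →
      (((List.range m).countP
          (fun (p : Nat) => decide ((p : Int) < b) && decide (cs.getD p ' ' = cs.getD (p + 1) ' '))) : Int)
        = ∑ x ∈ Finset.range m, (if (x : Int) < b then badVal cs x else 0) := by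
  intro m
  induction m with
  | zero => intro _; simp
  | succ k ih =>
    intro hk
    rw [List.range_succ, List.countP_append, Finset.sum_range_succ, ← ih (by omega)]
    push_cast
    have hsingle : (List.countP
        (fun (p : Nat) => decide ((p : Int) < b) && decide (cs.getD p ' ' = cs.getD (p + 1) ' ')) [k] : Int)
        = if (k : Int) < b then badVal cs k else 0 := by
      have hklen : k + 1 < cs.length := by omega
      rw [List.countP_cons, List.countP_nil]
      unfold badVal PairEq
      by_cases h1 : (k : Int) < b
      · by_cases h2 : cs.getD k ' ' = cs.getD (k + 1) ' '
        · simp only [h1, h2, decide_true, Bool.and_self]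
          simp [hklen]
        · simp [h1, h2, hklen]
      · simp [h1]
    rw [hsingle]

theorem sum_ite_badVal (cs : List Char) (b : Int) :
    ∑ x ∈ Finset.range (cs.length - 1), (if (x : Int) < b then badVal cs x else 0)
      = ∑ x ∈ Finset.range b.toNat, badVal cs x := by
  rw [← Finset.sum_filter]
  have hfe : (Finset.range (cs.length - 1)).filter (fun (x : Nat) => (x : Int) < b)
      = Finset.range (min (cs.length - 1) b.toNat) := by
    ext x
    simp only [Finset.mem_filter, Finset.mem_range, Nat.lt_min]
    constructor
    · rintro ⟨h1, h2⟩; exact ⟨h1, by omega⟩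
    · rintro ⟨h1, h2⟩; exact ⟨h1, by omega⟩
  rw [hfe]
  apply Finset.sum_subset
  · intro x hx
    simp only [Finset.mem_range] at hx ⊢
    omega
  · intro x hx hnx
    simp only [Finset.mem_range, Nat.lt_min, not_and, not_lt] at hx hnx
    unfold badVal PairEq
    rw [if_neg]
    rintro ⟨hlen, _⟩
    omega

theorem query_value_eq (cs : List Char) (l r : Int) (hlr : l ≤ r - 1)
    (_hr : r ≤ (cs.length : Int)) :
    ((PySem.List.bisectRight (badIdx cs) (r - 1) : Int)
        - (PySem.List.bisectLeft (badIdx cs) l : Int))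
      = ∑ x ∈ Finset.Ico l.toNat r.toNat, badVal cs x := by
  rw [bisectRight_countP _ _ (badIdx_sorted cs), bisectLeft_countP _ _ (badIdx_sorted cs)]
  unfold badIdx
  rw [List.countP_map, List.countP_map, List.countP_filter, List.countP_filter]
  have hc1 : List.countP
      (fun a => ((fun y => decide (y ≤ r - 1)) ∘ fun p => Int.ofNat p) a
        && decide (cs.getD a ' ' = cs.getD (a + 1) ' ')) (List.range (cs.length - 1))
      = List.countP
      (fun (p : Nat) => decide ((p : Int) < r) && decide (cs.getD p ' ' = cs.getD (p + 1) ' '))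
      (List.range (cs.length - 1)) := by
    apply List.countP_congr
    intro a _
    simp only [Function.comp_apply, Int.ofNat_eq_natCast, Bool.and_eq_true, decide_eq_true_eq]
    constructor <;> (rintro ⟨h1, h2⟩; exact ⟨by omega, h2⟩)
  have hc2 : List.countP
      (fun a => ((fun y => decide (y < l)) ∘ fun p => Int.ofNat p) a
        && decide (cs.getD a ' ' = cs.getD (a + 1) ' ')) (List.range (cs.length - 1))
      = List.countP
      (fun (p : Nat) => decide ((p : Int) < l) && decide (cs.getD p ' ' = cs.getD (p + 1) ' '))
      (List.range (cs.length - 1)) := by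
    apply List.countP_congr
    intro a _
    simp only [Function.comp_apply, Int.ofNat_eq_natCast]
  rw [hc1, hc2, countP_lt_sum cs r (cs.length - 1) (le_refl _),
    countP_lt_sum cs l (cs.length - 1) (le_refl _),
    sum_ite_badVal cs r, sum_ite_badVal cs l,
    Finset.sum_Ico_eq_sub _ (by omega : l.toNat ≤ r.toNat)]
theorem intGetD_set_self (l : List Int) (i : Nat) (v : Int) (h : i < l.length) :
    (l.set i v).getD i 0 = v := by
  simp [List.getD_eq_getElem?_getD, h]

theorem intGetD_set_ne (l : List Int) (i : Nat) (v : Int) (x : Nat) (h : i ≠ x) :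
    (l.set i v).getD x 0 = l.getD x 0 := by
  simp [List.getD_eq_getElem?_getD, h]

theorem TreeInv_congr {n : Nat} {a b : Nat → Int} {tree : List Int}
    (h : TreeInv n a tree) (hab : ∀ x, a x = b x) : TreeInv n b tree := by
  refine ⟨h.1, fun j h1 h2 => ?_⟩
  rw [h.2 j h1 h2]
  exact Finset.sum_congr rfl (fun x _ => hab x)

theorem badVal_high (cs : List Char) (x : Nat) (h : cs.length - 1 ≤ x) : badVal cs x = 0 := by
  unfold badVal PairEq
  rw [if_neg]
  rintro ⟨h1, _⟩
  omega

def aPart (cs : List Char) (k : Nat) : Nat → Int :=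
  fun x => if x < k then badVal cs x else 0

theorem aInit_spec (cs : List Char) :
    ∀ k, k ≤ cs.length - 1 →
      (((List.range k).foldl
        (fun (st : List Int × List Int) i =>
          if cs.getD i ' ' = cs.getD (i + 1) ' ' then
            (st.1.set i 1, ftUpdate st.2 (i : Int) 1)
          else st)
        (List.replicate cs.length 0, List.replicate (cs.length + 1) 0)).1.length = cs.length)
      ∧ (∀ x, ((List.range k).foldl
        (fun (st : List Int × List Int) i =>
          if cs.getD i ' ' = cs.getD (i + 1) ' ' then
            (st.1.set i 1, ftUpdate st.2 (i : Int) 1)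
          else st)
        (List.replicate cs.length 0, List.replicate (cs.length + 1) 0)).1.getD x 0
          = aPart cs k x)
      ∧ TreeInv cs.length (aPart cs k)
        ((List.range k).foldl
        (fun (st : List Int × List Int) i =>
          if cs.getD i ' ' = cs.getD (i + 1) ' ' then
            (st.1.set i 1, ftUpdate st.2 (i : Int) 1)
          else st)
        (List.replicate cs.length 0, List.replicate (cs.length + 1) 0)).2 := by
  intro k
  induction k with
  | zero =>
    intro _
    refine ⟨by simp, fun x => ?_, ⟨by simp, fun j h1 h2 => ?_⟩⟩
    · simp [aPart, List.getD_eq_getElem?_getD, List.getElem?_replicate]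
      split <;> rfl
    · simp [aPart, List.getD_eq_getElem?_getD, List.getElem?_replicate]
      split <;> simp
  | succ k ih =>
    intro hk
    obtain ⟨ihlen, ihbad, ihtree⟩ := ih (by omega)
    rw [List.range_succ, List.foldl_append, List.foldl_cons, List.foldl_nil]
    set st := (List.range k).foldl
        (fun (st : List Int × List Int) i =>
          if cs.getD i ' ' = cs.getD (i + 1) ' ' then
            (st.1.set i 1, ftUpdate st.2 (i : Int) 1)
          else st)
        (List.replicate cs.length 0, List.replicate (cs.length + 1) 0) with hst
    have hkpair : k + 1 < cs.length := by omega
    by_cases hc : cs.getD k ' ' = cs.getD (k + 1) ' '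
    · rw [if_pos hc]
      have hPE : PairEq cs k := ⟨hkpair, hc⟩
      have hbadk : badVal cs k = 1 := by unfold badVal; rw [if_pos hPE]
      refine ⟨by simpa using ihlen, fun x => ?_, ?_⟩
      · show (st.1.set k 1).getD x 0 = aPart cs (k + 1) x
        by_cases hx : x = k
        · subst hx
          rw [intGetD_set_self st.1 x 1 (by omega)]
          simp [aPart, hbadk]
        · rw [intGetD_set_ne st.1 k 1 x (fun hh => hx hh.symm), ihbad x]
          unfold aPart
          by_cases hxk : x < k
          · rw [if_pos hxk, if_pos (by omega)]
          · rw [if_neg hxk, if_neg (by omega)]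
      · show TreeInv cs.length (aPart cs (k + 1)) (ftUpdate st.2 (k : Int) 1)
        have h1 := ftUpdate_TreeInv ihtree (k : Int) 1 (by positivity) (by exact_mod_cast by omega)
        apply TreeInv_congr h1
        intro x
        simp only [Int.toNat_natCast]
        unfold aPart
        by_cases hx : x = k
        · subst hx
          rw [if_pos rfl, if_neg (by omega), if_pos (by omega)]
          omega
        · rw [if_neg hx]
          by_cases hxk : x < k
          · rw [if_pos hxk, if_pos (by omega)]
          · rw [if_neg hxk, if_neg (by omega)]
    · rw [if_neg hc]
      have hbadk : badVal cs k = 0 := by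
        unfold badVal
        rw [if_neg (fun hp => hc hp.2)]
      refine ⟨ihlen, fun x => ?_, ?_⟩
      · rw [ihbad x]
        unfold aPart
        by_cases hx : x = k
        · subst hx
          rw [if_neg (by omega), if_pos (by omega), hbadk]
        · by_cases hxk : x < k
          · rw [if_pos hxk, if_pos (by omega)]
          · rw [if_neg hxk, if_neg (by omega)]
      · apply TreeInv_congr ihtree
        intro x
        unfold aPart
        by_cases hx : x = k
        · subst hx
          rw [if_neg (by omega), if_pos (by omega), hbadk]
        · by_cases hxk : x < k
          · rw [if_pos hxk, if_pos (by omega)]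
          · rw [if_neg hxk, if_neg (by omega)]
def StRel (n : Nat) (stA : List Char × List Int × List Int × List Int)
    (stB : List Char × List Int × List Int) : Prop :=
  stA.1 = stB.1 ∧ stA.2.2.2 = stB.2.2 ∧ stB.2.1 = badIdx stA.1 ∧
  stA.1.length = n ∧ stA.2.1.length = n ∧
  (∀ x, stA.2.1.getD x 0 = badVal stA.1 x) ∧
  TreeInv n (badVal stA.1) stA.2.2.1

def preQ (n : Nat) (q : List Int) : Prop :=
  q ≠ [] ∧
    (if q.getD 0 0 = 1 then
      2 ≤ q.length ∧ 0 ≤ q.getD 1 0 ∧ q.getD 1 0 < (n : Int)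
    else
      3 ≤ q.length ∧ (q.getD 1 0 ≤ q.getD 2 0 - 1 → q.getD 2 0 ≤ (n : Int)))

theorem StRel_step {n : Nat} {stA : List Char × List Int × List Int × List Int}
    {stB : List Char × List Int × List Int}
    (h : StRel n stA stB) (q : List Int) (hq : preQ n q) :
    StRel n (aStep (n : Int) stA q) (bStep stB q) := by
  obtain ⟨cs, bad, tree, ans⟩ := stA
  obtain ⟨csB, badL, ansB⟩ := stB
  obtain ⟨hcs, hans, hbL, hlen, hblen, hbad, htree⟩ := h
  simp only at hcs hans hbL hlen hblen hbad htree
  subst hcs hans hbL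
  rw [aStep, bStep]
  by_cases hq1 : q.getD 0 0 = 1
  · rw [if_pos hq1, if_pos hq1]
    obtain ⟨-, hqr⟩ := hq
    rw [if_pos hq1] at hqr
    obtain ⟨-, h0, hn⟩ := hqr
    dsimp only
    set idx := q.getD 1 0 with hidx
    set k := idx.toNat with hk
    have hkn : k < n := by omega
    set c' : Char := if cs.getD k ' ' = 'A' then 'B' else 'A' with hc'
    set cs' := cs.set k c' with hcs'
    have hlen' : cs'.length = n := by rw [hcs', List.length_set, hlen]
    have htrans : ∀ x : Nat, x ≠ k → x + 1 ≠ k → badVal cs' x = badVal cs x :=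
      fun x hx1 hx2 => badVal_set_ne cs k c' x hx1 hx2
    have hB : bFix cs' (bFix cs' (badIdx cs) (idx - 1)) idx = badIdx cs' :=
      bFix_toggle cs cs' idx h0 (by omega) rfl
    set v1 := isBadA cs' (idx - 1) with hv1
    set v2 := isBadA cs' idx with hv2
    have hv2' : v2 = badVal cs' k := by
      rw [hv2, isBadA_eq_badVal cs' idx h0]
    refine ⟨rfl, rfl, hB, hlen', ?_, ?_, ?_⟩
    · -- length of the bad-status array is preserved
      by_cases hp : idx > 0 <;> by_cases hl : idx < (n : Int) - 1
      · simp only [if_pos hp, if_pos hl, List.length_set, hblen]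
      · simp only [if_pos hp, if_neg hl, List.length_set, hblen]
      · simp only [if_neg hp, if_pos hl, List.length_set, hblen]
      · simp only [if_neg hp, if_neg hl, hblen]
    · -- the bad-status array tracks badVal cs'
      intro x
      by_cases hp : idx > 0
      · have hk1 : 1 ≤ k := by omega
        have e1 : (idx - 1).toNat = k - 1 := by omega
        have hv1' : v1 = badVal cs' (k - 1) := by
          rw [hv1, isBadA_eq_badVal cs' (idx - 1) (by omega), e1]
        by_cases hl : idx < (n : Int) - 1
        · simp only [if_pos hp, if_pos hl]
          rw [e1]
          by_cases hx2 : x = k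
          · subst hx2
            rw [intGetD_set_self _ _ _ (by rw [List.length_set, hblen]; omega), hv2']
          · rw [intGetD_set_ne _ _ _ _ (fun hh => hx2 hh.symm)]
            by_cases hx1 : x = k - 1
            · subst hx1
              rw [intGetD_set_self _ _ _ (by rw [hblen]; omega), hv1']
            · rw [intGetD_set_ne _ _ _ _ (fun hh => hx1 hh.symm), hbad x,
                htrans x hx2 (by omega)]
        · have hkn1 : k = n - 1 := by omega
          simp only [if_pos hp, if_neg hl]
          rw [e1]
          by_cases hx1 : x = k - 1
          · subst hx1
            rw [intGetD_set_self _ _ _ (by rw [hblen]; omega), hv1']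
          · rw [intGetD_set_ne _ _ _ _ (fun hh => hx1 hh.symm), hbad x]
            by_cases hx2 : x = k
            · subst hx2
              rw [badVal_high cs k (by omega), badVal_high cs' k (by rw [hlen']; omega)]
            · rw [htrans x hx2 (by omega)]
      · have hk0 : k = 0 := by omega
        by_cases hl : idx < (n : Int) - 1
        · simp only [if_neg hp, if_pos hl]
          rw [hk0]
          by_cases hx2 : x = 0
          · subst hx2
            rw [intGetD_set_self _ _ _ (by rw [hblen]; omega), hv2', hk0]
          · rw [intGetD_set_ne _ _ _ _ (fun hh => hx2 hh.symm), hbad x,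
              htrans x (by omega) (by omega)]
        · have hn1 : n = 1 := by omega
          simp only [if_neg hp, if_neg hl]
          rw [hbad x]
          by_cases hx2 : x = 0
          · subst hx2
            rw [badVal_high cs 0 (by omega), badVal_high cs' 0 (by rw [hlen']; omega)]
          · rw [htrans x (by omega) (by omega)]
    · -- the Fenwick tree tracks badVal cs'
      by_cases hp : idx > 0
      · have hk1 : 1 ≤ k := by omega
        have e1 : (idx - 1).toNat = k - 1 := by omega
        have hv1' : v1 = badVal cs' (k - 1) := by
          rw [hv1, isBadA_eq_badVal cs' (idx - 1) (by omega), e1]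
        by_cases hl : idx < (n : Int) - 1
        · simp only [if_pos hp, if_pos hl]
          have t1 := ftUpdate_TreeInv htree (idx - 1) (-(bad.getD (idx - 1).toNat 0))
            (by omega) (by omega)
          have t2 := ftUpdate_TreeInv t1 idx (-(bad.getD idx.toNat 0)) (by omega) (by omega)
          have t3 := ftUpdate_TreeInv t2 (idx - 1) v1 (by omega) (by omega)
          have t4 := ftUpdate_TreeInv t3 idx v2 (by omega) (by omega)
          apply TreeInv_congr t4
          intro x
          simp only [e1, ← hk]
          by_cases hx2 : x = k
          · subst hx2
            rw [if_pos rfl, if_neg (by omega), if_pos rfl, if_neg (by omega),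
              hbad k, hv2']
            ring
          · rw [if_neg hx2]
            by_cases hx1 : x = k - 1
            · subst hx1
              rw [if_pos rfl, if_neg (by omega), if_pos rfl, hbad (k - 1), hv1']
              ring
            · rw [if_neg hx1, if_neg hx2, if_neg hx1, htrans x hx2 (by omega)]
        · have hkn1 : k = n - 1 := by omega
          simp only [if_pos hp, if_neg hl]
          have t1 := ftUpdate_TreeInv htree (idx - 1) (-(bad.getD (idx - 1).toNat 0))
            (by omega) (by omega)
          have t3 := ftUpdate_TreeInv t1 (idx - 1) v1 (by omega) (by omega)
          apply TreeInv_congr t3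
          intro x
          simp only [e1]
          by_cases hx1 : x = k - 1
          · subst hx1
            rw [if_pos rfl, if_pos rfl, hbad (k - 1), hv1']
            ring
          · rw [if_neg hx1, if_neg hx1]
            by_cases hx2 : x = k
            · subst hx2
              rw [badVal_high cs k (by omega), badVal_high cs' k (by rw [hlen']; omega)]
            · rw [htrans x hx2 (by omega)]
      · have hk0 : k = 0 := by omega
        by_cases hl : idx < (n : Int) - 1
        · simp only [if_neg hp, if_pos hl]
          have t2 := ftUpdate_TreeInv htree idx (-(bad.getD idx.toNat 0)) (by omega) (by omega)
          have t4 := ftUpdate_TreeInv t2 idx v2 (by omega) (by omega)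
          apply TreeInv_congr t4
          intro x
          simp only [← hk]
          by_cases hx2 : x = k
          · subst hx2
            rw [if_pos rfl, if_pos rfl, hbad k, hv2']
            ring
          · rw [if_neg hx2, if_neg hx2, htrans x hx2 (by omega)]
        · have hn1 : n = 1 := by omega
          simp only [if_neg hp, if_neg hl]
          apply TreeInv_congr htree
          intro x
          by_cases hx2 : x = k
          · subst hx2
            rw [badVal_high cs k (by omega), badVal_high cs' k (by rw [hlen']; omega)]
          · rw [htrans x hx2 (by omega)]
  · -- a count query: both sides append the same number
    rw [if_neg hq1, if_neg hq1]
    obtain ⟨-, hqr⟩ := hq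
    rw [if_neg hq1] at hqr
    obtain ⟨-, himp⟩ := hqr
    dsimp only
    have hval : ftQueryRange tree (q.getD 1 0) (q.getD 2 0 - 1)
        = (if q.getD 1 0 ≤ q.getD 2 0 - 1 then
            ((PySem.List.bisectRight (badIdx cs) (q.getD 2 0 - 1) : Int)
              - (PySem.List.bisectLeft (badIdx cs) (q.getD 1 0) : Int))
          else 0) := by
      set l := q.getD 1 0 with hl
      set r := q.getD 2 0 with hr
      by_cases hc : l ≤ r - 1
      · rw [if_pos hc]
        have hrn : r ≤ (n : Int) := himp hc
        have hA := ftQueryRange_eq htree l r hc hrn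
        have hBv := query_value_eq cs l r hc (by rw [hlen]; exact hrn)
        rw [hA, ← hBv]
      · rw [if_neg hc, ftQueryRange, if_pos (by omega)]
    exact ⟨rfl, by rw [hval], rfl, hlen, hblen, hbad, htree⟩
theorem StRel_init (cs : List Char) :
    StRel cs.length (cs, (aInit cs).1, (aInit cs).2, []) (cs, badIdx cs, []) := by
  obtain ⟨l1, l2, l3⟩ := aInit_spec cs (cs.length - 1) (le_refl _)
  have hpart : ∀ x, aPart cs (cs.length - 1) x = badVal cs x := by
    intro x
    unfold aPart
    by_cases hx : x < cs.length - 1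
    · rw [if_pos hx]
    · rw [if_neg hx, badVal_high cs x (by omega)]
  unfold StRel aInit
  refine ⟨rfl, rfl, rfl, rfl, l1, fun x => ?_, ?_⟩
  · rw [l2 x, hpart x]
  · exact TreeInv_congr l3 hpart

theorem StRel_foldl {n : Nat} (queries : List (List Int)) :
    ∀ {stA stB}, StRel n stA stB → (∀ q ∈ queries, preQ n q) →
      StRel n (queries.foldl (aStep (n : Int)) stA) (queries.foldl bStep stB) := by
  induction queries with
  | nil => intro stA stB h _; exact h
  | cons q qs ih =>
    intro stA stB h hq
    rw [List.foldl_cons, List.foldl_cons]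
    exact ih (StRel_step h q (hq q List.mem_cons_self)) (fun p hp => hq p (List.mem_cons_of_mem q hp))

theorem minDeletions_spec' (s : String) (queries : List (List Int))
    (hpre : ∀ q ∈ queries, preQ s.toList.length q) :
    minDeletions s queries = minDeletions_alt s queries := by
  unfold minDeletions minDeletions_alt
  have h := StRel_foldl (n := s.toList.length) queries (StRel_init s.toList) hpre
  obtain ⟨-, hans, -⟩ := h
  exact hans

-- ===== VERDICT (by name: the statement is the Claim_ definition above) =====
theorem minDeletions_spec : Claim_equal_minDeletions := by
  intro s queries _hdom hpre
  unfold Spec_minDeletions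
  exact minDeletions_spec' s queries (fun q hq => hpre q hq)
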